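-- pv_equiv track=rewrite | github.com/snirandjan/gmhcira | notebooks/+[atj.py | accumulated_damage_rp
-- ===== SOURCE A (Python) =====
-- def accumulated_damage_rp(return_periods_dict_for_asset):
--     """
--     Adjusts the damage values in the return_periods_dict_for_asset dictionary.
--     The damages of all return periods lower than a certain return period are added to the damages of that return period.
--
--     Parameters:
--     return_periods_dict_for_asset (dict): A dictionary with return periods as keys and damages as values.
--
--     Returns:
--     dict: Adjusted dictionary with accumulated damages.
--     """
--
--     # Sort the return periods
--     sorted_return_periods = sorted(return_periods_dict_for_asset.keys())
--
--     # Initialize the adjusted dictionary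
--     adjusted_dict = {}
--
--     # Iterate over the sorted return periods
--     for i, current_period in enumerate(sorted_return_periods):
--         # Initialize the cumulative damage
--         cumulative_damage = return_periods_dict_for_asset[current_period]
--
--         # Add the damages of all lower return periods
--         for lower_period in sorted_return_periods[:i]:
--             cumulative_damage += return_periods_dict_for_asset[lower_period]
--
--         # Store the adjusted damage in the dictionary
--         adjusted_dict[current_period] = cumulative_damage
--
--     return adjusted_dict
-- ===== SOURCE B (Python) =====
-- def accumulated_damage_rp(return_periods_dict_for_asset):
--     # Single pass with a running prefix sum over the sorted return periods.
--     adjusted_dict = {}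
--     total = 0
--     for period in sorted(return_periods_dict_for_asset):
--         total += return_periods_dict_for_asset[period]
--         adjusted_dict[period] = total
--     return adjusted_dict
-- ===== Notes on version B (the rewrite author's own statement) =====
-- stated objective: faster
-- what changed: Replaces the nested re-summation of all lower return periods for every period by a single running prefix sum over the sorted keys.
import Mathlib
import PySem

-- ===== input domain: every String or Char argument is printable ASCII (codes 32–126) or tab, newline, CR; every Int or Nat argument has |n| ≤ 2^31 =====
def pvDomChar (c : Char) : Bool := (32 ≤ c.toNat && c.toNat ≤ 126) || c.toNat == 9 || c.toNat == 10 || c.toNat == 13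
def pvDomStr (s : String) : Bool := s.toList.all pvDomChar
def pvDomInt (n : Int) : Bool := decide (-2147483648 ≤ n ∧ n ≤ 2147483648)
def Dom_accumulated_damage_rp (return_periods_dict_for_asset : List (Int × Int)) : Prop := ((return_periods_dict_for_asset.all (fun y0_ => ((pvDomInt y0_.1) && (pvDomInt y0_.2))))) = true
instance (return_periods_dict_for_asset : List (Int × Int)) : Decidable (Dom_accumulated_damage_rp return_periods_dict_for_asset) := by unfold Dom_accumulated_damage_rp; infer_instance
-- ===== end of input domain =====

-- B replaces A's quadratic re-summation of all lower return periods by one running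
-- prefix sum over the sorted keys (measured faster; asymptotic change).


-- ===== PORT A =====
-- d[k] is ported as getD _ 0: every looked-up key comes from d.keys, so the
-- default is never consulted and Python's KeyError is unreachable.
def accumulated_damage_rp (return_periods_dict_for_asset : List (Int × Int)) : List (Int × Int) :=
  let d := PySem.Dict.ofList return_periods_dict_for_asset
  let sorted_return_periods := PySem.List.sorted (PySem.Dict.keys d) (fun x => x) false
  let adjusted_dict : PySem.Dict Int Int :=
    (PySem.List.enumerate sorted_return_periods 0).foldl
      (fun adjusted_dict p =>
        let cumulative_damage := PySem.Dict.getD d p.2 0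
        let cumulative_damage :=
          (PySem.List.slice sorted_return_periods none (some p.1)).foldl
            (fun c lower_period => c + PySem.Dict.getD d lower_period 0) cumulative_damage
        PySem.Dict.insert adjusted_dict p.2 cumulative_damage)
      PySem.Dict.empty
  adjusted_dict.items

-- ===== PORT B =====
def accumulated_damage_rp_alt (return_periods_dict_for_asset : List (Int × Int)) : List (Int × Int) :=
  let d := PySem.Dict.ofList return_periods_dict_for_asset
  let st :=
    (PySem.List.sorted (PySem.Dict.keys d) (fun x => x) false).foldl
      (fun (st : Int × PySem.Dict Int Int) period =>
        let total := st.1 + PySem.Dict.getD d period 0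
        (total, PySem.Dict.insert st.2 period total))
      (0, PySem.Dict.empty)
  st.2.items

-- ===== PRECONDITION & SPEC =====
def Spec_accumulated_damage_rp (return_periods_dict_for_asset : List (Int × Int)) (out : List (Int × Int)) : Prop := out = accumulated_damage_rp_alt return_periods_dict_for_asset
instance (return_periods_dict_for_asset : List (Int × Int)) (out : List (Int × Int)) : Decidable (Spec_accumulated_damage_rp return_periods_dict_for_asset out) := by unfold Spec_accumulated_damage_rp; infer_instance

-- ===== CLAIM (what is proved, stated in full; the proofs are below) =====
def Claim_equal_accumulated_damage_rp : Prop := ∀ (return_periods_dict_for_asset : List (Int × Int)), Dom_accumulated_damage_rp return_periods_dict_for_asset → Spec_accumulated_damage_rp return_periods_dict_for_asset (accumulated_damage_rp return_periods_dict_for_asset)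

-- ===== LEMMAS AND PROOFS =====

/-- Core loop correspondence: A's quadratic loop over `enumerate` of the sorted
keys (re-summing the slice of lower keys each time) builds the same dictionary
as B's single pass with a running total, when the already-processed prefix is
`done` and B's running total is the sum of `g` over `done`. -/
theorem pv_loop_eq (g : Int → Int) :
    ∀ (rest done : List Int) (adj : PySem.Dict Int Int),
      (PySem.List.enumerate rest ((done.length : Int))).foldl
        (fun adjusted_dict p =>
          PySem.Dict.insert adjusted_dict p.2
            ((PySem.List.slice (done ++ rest) none (some p.1)).foldl
              (fun c k => c + g k) (g p.2))) adj
      =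
      (rest.foldl
        (fun (st : Int × PySem.Dict Int Int) k =>
          (st.1 + g k, PySem.Dict.insert st.2 k (st.1 + g k)))
        ((done.map g).sum, adj)).2 := by
  intro rest
  induction rest with
  | nil => intro done adj; simp [PySem.List.enumerate]
  | cons k rest ih =>
    intro done adj
    rw [PySem.List.enumerate_cons, List.foldl_cons, List.foldl_cons]
    have hsl : PySem.List.slice (done ++ k :: rest) none (some ((done.length : Int)))
        = done := by
      rw [PySem.List.slice_to_natCast]
      exact List.take_left
    rw [hsl, PySem.List.foldl_add]
    have hcast : (done.length : Int) + 1 = ((done ++ [k]).length : Int) := by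
      simp
    have hlist : done ++ k :: rest = (done ++ [k]) ++ rest := by simp
    rw [hcast, hlist, ih (done ++ [k])]
    have hsum : ((done ++ [k]).map g).sum = (done.map g).sum + g k := by simp
    rw [hsum]
    ring_nf

-- ===== VERDICT (by name: the statement is the Claim_ definition above) =====
theorem accumulated_damage_rp_spec : Claim_equal_accumulated_damage_rp := by
  intro rp _
  show accumulated_damage_rp rp = accumulated_damage_rp_alt rp
  unfold accumulated_damage_rp accumulated_damage_rp_alt
  simp only []
  have := pv_loop_eq
    (fun k => PySem.Dict.getD (PySem.Dict.ofList rp) k 0)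
    (PySem.List.sorted (PySem.Dict.keys (PySem.Dict.ofList rp)) (fun x => x) false)
    [] PySem.Dict.empty
  simp only [List.nil_append, List.length_nil, Nat.cast_zero, List.map_nil, List.sum_nil] at this
  rw [this]
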